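-- pv_equiv track=rewrite | github.com/ttvpro007/PythonProblems | labs109.py | duplicate_digit_bonus
-- ===== SOURCE A (Python) =====
-- def get_consectutive_items_with_condition(items, condition, take_all = False):
--
--     start = -1
--     sublists = []
--
--     for i in range(len(items) - 1):
--
--         # if condition is satisfied
--         if condition(items[i], items[i + 1]):
--             # set flag start at index i
--             if start == -1:
--                 start = i
--
--         # if flag start has already been set
--         # and condition is not satisfied
--         elif start != -1:
--             # append the block of item from index start to index i + 1
--             sublists.append(items[start : i + 1])
--             # reset flag start
--             start = -1
--
--         # if flag has not been set
--         # and condition is not satisfied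
--         # elif start == -1 and take_all:
--         elif start == -1 and take_all:
--             # append that item as the sublist
--             sublists.append([items[i]])
--
--         # use this block of code to check within the loop and not the for...else block
--         # if start != -1 and i == len(items) - 2:
--         #     sublists.append(items[start : i + 2])
--
--     else:
--         # this check for item that appear at the end of the list
--         # if flag start has already been set
--         # we take the block of number from index start to index i + 2
--         if start != -1:
--             sublists.append(items[start : i + 2])
--         # if flag start has not been set
--         elif take_all:
--             sublists.append([items[i + 1]])
--
--     return sublists
--
-- def is_equal(a, b):
--     return a == b
--
-- def duplicate_digit_bonus(number):
--
--     # handles numbers less than 10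
--     if number // 10 == 0:
--         return 0
--
--     duplicate_numbers = get_consectutive_items_with_condition(str(number), is_equal)
--     score = 0
--
--     for dup_num in duplicate_numbers:
--         score += calculate_score(dup_num)
--
--     # bonus score if ends with duplicate numbers
--     if len(duplicate_numbers) > 0:
--         last_duplicate_number = duplicate_numbers[len(duplicate_numbers) - 1]
--
--         if str(number).endswith(last_duplicate_number):
--             score += calculate_score(last_duplicate_number)
--
--     return score
--
-- def calculate_score(duplicate_number):
--     return 10 ** (len(duplicate_number) - 2)
-- ===== SOURCE B (Python) =====
-- def duplicate_digit_bonus(number):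
--     # Single pass over adjacent character pairs with a run-length counter
--     # (no sublist building, no flag/start state machine, no endswith test).
--     if 0 <= number <= 9:
--         return 0
--     s = str(number)
--     score = 0
--     run = 1
--     for prev, cur in zip(s, s[1:]):
--         if cur == prev:
--             run += 1
--         else:
--             if run >= 2:
--                 score += 10 ** (run - 2)
--             run = 1
--     # the final run ends the string, so its bonus is counted twice
--     if run >= 2:
--         score += 2 * 10 ** (run - 2)
--     return score
-- ===== Notes on version B (the rewrite author's own statement) =====
-- stated objective: simpler
-- what changed: Replaces the generic start/flag sublist-collecting state machine plus per-sublist scoring and an endswith suffix test with one direct pass over adjacent character pairs keeping only a run-length counter and the score, doubling the final run's bonus arithmetically.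
import Mathlib
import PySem

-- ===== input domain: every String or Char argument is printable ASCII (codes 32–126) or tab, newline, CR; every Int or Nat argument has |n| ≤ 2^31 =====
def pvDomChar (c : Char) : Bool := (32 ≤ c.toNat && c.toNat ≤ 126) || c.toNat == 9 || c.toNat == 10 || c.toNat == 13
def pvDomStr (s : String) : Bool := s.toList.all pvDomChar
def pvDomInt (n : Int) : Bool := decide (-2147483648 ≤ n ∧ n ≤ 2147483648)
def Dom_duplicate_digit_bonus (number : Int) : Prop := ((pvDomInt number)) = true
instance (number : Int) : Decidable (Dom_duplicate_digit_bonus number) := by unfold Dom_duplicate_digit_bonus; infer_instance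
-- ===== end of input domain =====

-- B replaces A's sublist-collecting state machine + endswith bonus by a single
-- run-length-counter pass over adjacent character pairs (simpler decomposition).


-- ===== PORT A =====
-- loop body of get_consectutive_items_with_condition; state = (start, sublists).
-- Indices i and i+1 are always in range inside the loop, so pyGetD with a dummy
-- default is exact.
def pvStepA (items : List Char) (condition : Char → Char → Bool) (take_all : Bool)
    (acc : Int × List (List Char)) (i : Nat) : Int × List (List Char) :=
  if condition (PySem.List.pyGetD items (i : Int) ' ')
      (PySem.List.pyGetD items ((i : Int) + 1) ' ') then
    (if acc.1 == -1 then ((i : Int), acc.2) else acc)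
  else if acc.1 != -1 then
    (-1, acc.2 ++ [PySem.List.slice items (some acc.1) (some ((i : Int) + 1))])
  else if acc.1 == -1 && take_all then
    (acc.1, acc.2 ++ [[PySem.List.pyGetD items (i : Int) ' ']])
  else acc

-- port of get_consectutive_items_with_condition.  Python's for-else leaves i at
-- len(items)-2; at the sole call site the list has length ≥ 2 so the loop always
-- runs (for shorter lists start stays -1 and the i-dependent branch is dead).
def pvGetCons (items : List Char) (condition : Char → Char → Bool) (take_all : Bool) :
    List (List Char) :=
  let st := (List.range (items.length - 1)).foldl (pvStepA items condition take_all) (-1, [])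
  let i : Int := (items.length : Int) - 2
  if st.1 != -1 then st.2 ++ [PySem.List.slice items (some st.1) (some (i + 2))]
  else if take_all then st.2 ++ [[PySem.List.pyGetD items (i + 1) ' ']]
  else st.2

-- calculate_score; every sublist scored has length ≥ 2, so Nat subtraction is exact
def pvCalculateScore (duplicate_number : List Char) : Int :=
  10 ^ (duplicate_number.length - 2)

def duplicate_digit_bonus (number : Int) : Int :=
  if PySem.Int.floordiv number 10 == 0 then 0
  else
    let s := PySem.Int.toChars number
    let dups := pvGetCons s (fun a b => a == b) false
    let score := dups.foldl (fun acc d => acc + pvCalculateScore d) 0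
    if dups.length > 0 then
      let last := PySem.List.pyGetD dups ((dups.length : Int) - 1) []
      if PySem.Chars.endswith s last then score + pvCalculateScore last else score
    else score

-- ===== PORT B =====
-- loop body of Source B's single pass; state = (score, run), pc = (prev, cur)
def pvStepB (acc : Int × Int) (pc : Char × Char) : Int × Int :=
  if pc.2 == pc.1 then (acc.1, acc.2 + 1)
  else if acc.2 ≥ 2 then (acc.1 + 10 ^ (acc.2 - 2).toNat, 1)
  else (acc.1, 1)

def duplicate_digit_bonus_alt (number : Int) : Int :=
  if 0 ≤ number ∧ number ≤ 9 then 0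
  else
    let s := PySem.Int.toChars number
    let st := (s.zip (PySem.List.slice s (some 1) none)).foldl pvStepB (0, 1)
    if st.2 ≥ 2 then st.1 + 2 * 10 ^ (st.2 - 2).toNat else st.1

-- ===== PRECONDITION & SPEC =====
def Spec_duplicate_digit_bonus (number : Int) (out : Int) : Prop := out = duplicate_digit_bonus_alt number
instance (number : Int) (out : Int) : Decidable (Spec_duplicate_digit_bonus number out) := by unfold Spec_duplicate_digit_bonus; infer_instance

-- ===== CLAIM (what is proved, stated in full; the proofs are below) =====
def Claim_equal_duplicate_digit_bonus : Prop := ∀ (number : Int), Dom_duplicate_digit_bonus number → Spec_duplicate_digit_bonus number (duplicate_digit_bonus number)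

-- ===== LEMMAS AND PROOFS =====

-- sum of scores of a list of sublists, as A's fold computes it
def pvSum (subs : List (List Char)) : Int :=
  subs.foldl (fun acc d => acc + pvCalculateScore d) 0

-- every collected sublist is a constant run of length ≥ 2
def pvGood (subs : List (List Char)) : Prop :=
  ∀ d ∈ subs, ∃ (L : Nat) (c : Char), 2 ≤ L ∧ d = List.replicate L c

-- joint invariant after processing the first j adjacent pairs
def pvInv (s : List Char) (j : Nat) (a : Int × List (List Char)) (b : Int × Int) : Prop :=
  b.1 = pvSum a.2 ∧ pvGood a.2 ∧
  ((a.1 = -1 ∧ b.2 = 1 ∧ (1 ≤ j → s[j-1]? ≠ s[j]?)) ∨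
   (∃ st : Nat, a.1 = (st : Int) ∧ st < j ∧ j < s.length ∧
      b.2 = ((j - st : Nat) : Int) + 1 ∧
      ∀ k, st ≤ k → k ≤ j → s[k]? = s[st]?))

theorem pvSum_append (subs : List (List Char)) (d : List Char) :
    pvSum (subs ++ [d]) = pvSum subs + pvCalculateScore d := by
  simp [pvSum, List.foldl_append]

theorem pv_const_slice (s : List Char) (st e : Nat) (he : e ≤ s.length)
    (hall : ∀ k, st ≤ k → k ≤ e - 1 → s[k]? = s[st]?) (hlt : st < e) (c : Char)
    (hc : s[st]? = some c) :
    (s.drop st).take (e - st) = List.replicate (e - st) c := by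
  apply List.ext_getElem
  · simp; omega
  · intro i h1 h2
    have hi : i < e - st := by
      have := h1; simp at this; omega
    have h3 : st + i ≤ e - 1 := by omega
    have h4 : s[st + i]? = some c := by rw [hall (st + i) (by omega) h3]; exact hc
    have h5 : st + i < s.length := by omega
    have hv : s[st + i] = c := by
      have := List.getElem?_eq_getElem h5 ▸ h4
      simpa using this
    have hrep : (List.replicate (e - st) c)[i] = c := List.getElem_replicate ..
    rw [hrep]
    rw [List.getElem_take, List.getElem_drop]
    exact hv

theorem pv_zip_get (s : List Char) (j : Nat) (h : j + 1 < s.length) :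
    (s.zip s.tail)[j]? = some (s[j], s[j+1]) := by
  have hlen : (s.zip s.tail).length = s.length - 1 := by
    rw [List.length_zip, List.length_tail]; omega
  have hj : j < (s.zip s.tail).length := by omega
  rw [List.getElem?_eq_getElem hj]
  congr 1
  have h1 : (s.zip s.tail)[j] = (s[j]'(by omega), s.tail[j]'(by simp [List.length_tail]; omega)) := by
    simp [List.getElem_zip]
  rw [h1]
  congr 1
  simp [List.getElem_tail]

theorem pv_inv_holds (s : List Char) (j : Nat) (hj : j ≤ s.length - 1) :
    pvInv s j
      ((List.range j).foldl (pvStepA s (fun a b => a == b) false) (-1, []))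
      (((s.zip s.tail).take j).foldl pvStepB (0, 1)) := by
  induction j with
  | zero =>
      simp [pvInv, pvSum, pvGood]
  | succ j ih =>
      have hjlt : j + 1 < s.length := by omega
      obtain ⟨hsc, hgood, hcase⟩ := ih (by omega)
      rw [List.range_succ, List.foldl_append]
      have htake : (s.zip s.tail).take (j+1)
          = (s.zip s.tail).take j ++ [(s[j]'(by omega), s[j+1]'(by omega))] := by
        rw [List.take_add_one, pv_zip_get s j hjlt]
        simp
      rw [htake, List.foldl_append]
      simp only [List.foldl_cons, List.foldl_nil]
      set A := (List.range j).foldl (pvStepA s (fun a b => a == b) false) (-1, []) with hA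
      set B := ((s.zip s.tail).take j).foldl pvStepB (0, 1) with hB
      clear_value A B
      have hgj : PySem.List.pyGetD s ((j : Nat) : Int) ' ' = s[j]'(by omega) := by
        simp [PySem.List.pyGetD_natCast]
        exact List.getD_eq_getElem s ' ' (by omega)
      have hgj1 : PySem.List.pyGetD s (((j : Nat) : Int) + 1) ' ' = s[j+1]'(by omega) := by
        have hc1 : ((j : Nat) : Int) + 1 = ((j + 1 : Nat) : Int) := by omega
        rw [hc1, PySem.List.pyGetD_natCast]
        exact List.getD_eq_getElem s ' ' hjlt
      by_cases heq : s[j]'(by omega) = s[j+1]'(by omega)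
      · -- equal pair: A sets/keeps start, B bumps run
        have hstepB : pvStepB B (s[j]'(by omega), s[j+1]'(by omega)) = (B.1, B.2 + 1) := by
          simp [pvStepB, heq]
        rw [hstepB]
        rcases hcase with ⟨h1, h2, _⟩ | ⟨st, h1, h2, h3, h4, h5⟩
        · -- start was -1: set start := j
          have hstep : pvStepA s (fun a b => a == b) false A j = ((j : Int), A.2) := by
            simp [pvStepA, hgj, hgj1, heq, h1]
          rw [hstep]
          refine ⟨hsc, hgood, Or.inr ⟨j, rfl, by omega, hjlt, ?_, ?_⟩⟩
          · show B.2 + 1 = ((j + 1 - j : Nat) : Int) + 1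
            rw [h2]; simp
          · intro k hk1 hk2
            have hcases : k = j ∨ k = j + 1 := by omega
            rcases hcases with hk | hk
            · rw [hk]
            · rw [hk, List.getElem?_eq_getElem hjlt, List.getElem?_eq_getElem (show j < s.length by omega)]
              exact congrArg some heq.symm
        · -- start stays st
          have hstep : pvStepA s (fun a b => a == b) false A j = A := by
            have : ¬ (A.1 == -1) = true := by simp [h1]
            simp [pvStepA, hgj, hgj1, heq, this]
          rw [hstep]
          refine ⟨hsc, hgood, Or.inr ⟨st, h1, by omega, hjlt, ?_, ?_⟩⟩
          · show B.2 + 1 = ((j + 1 - st : Nat) : Int) + 1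
            rw [h4]; omega
          · intro k hk1 hk2
            rcases Nat.lt_or_ge k (j+1) with hk | hk
            · exact h5 k hk1 (by omega)
            · have hkj : k = j + 1 := by omega
              subst hkj
              rw [List.getElem?_eq_getElem hjlt, ← h5 j (by omega) (by omega),
                List.getElem?_eq_getElem (show j < s.length by omega)]
              exact congrArg some heq.symm
      · -- unequal pair
        have hneq? : s[j]? ≠ s[j+1]? := by
          rw [List.getElem?_eq_getElem hjlt, List.getElem?_eq_getElem (show j < s.length by omega)]
          intro h; exact heq (Option.some.injEq _ _ ▸ h)
        rcases hcase with ⟨h1, h2, _⟩ | ⟨st, h1, h2, h3, h4, h5⟩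
        · -- start = -1, run = 1: both unchanged
          have hstep : pvStepA s (fun a b => a == b) false A j = A := by
            simp [pvStepA, hgj, hgj1, heq, h1]
          have hstepB : pvStepB B (s[j]'(by omega), s[j+1]'(by omega)) = (B.1, 1) := by
            have hne : ¬ (s[j+1]'(by omega) == s[j]'(by omega)) = true := by
              simp; intro h; exact heq h.symm
            have hlt2 : ¬ B.2 ≥ 2 := by omega
            simp [pvStepB, hne, hlt2]
          rw [hstep, hstepB]
          refine ⟨hsc, hgood, Or.inl ⟨h1, rfl, fun _ => by simpa using hneq?⟩⟩
        · -- start = st: flush the run, B adds its score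
          obtain ⟨c, hc⟩ : ∃ c, s[st]? = some c :=
            ⟨s[st]'(by omega), List.getElem?_eq_getElem (by omega)⟩
          have hslice : PySem.List.slice s (some A.1) (some ((j : Int) + 1))
              = List.replicate (j + 1 - st) c := by
            rw [h1]
            have hc1 : ((j : Nat) : Int) + 1 = ((j + 1 : Nat) : Int) := by omega
            rw [hc1, PySem.List.slice_natCast]
            exact pv_const_slice s st (j+1) (by omega)
              (by intro k hk1 hk2; exact h5 k hk1 (by omega)) (by omega) c hc
          have hstep : pvStepA s (fun a b => a == b) false A j
              = (-1, A.2 ++ [List.replicate (j + 1 - st) c]) := by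
            have hne : (A.1 != -1) = true := by simp [h1]
            simp only [pvStepA, hgj, hgj1]
            rw [if_neg (by simp [heq]), if_pos hne, hslice]
          have hstepB : pvStepB B (s[j]'(by omega), s[j+1]'(by omega))
              = (B.1 + 10 ^ (B.2 - 2).toNat, 1) := by
            have hne : ¬ (s[j+1]'(by omega) == s[j]'(by omega)) = true := by
              simp; intro h; exact heq h.symm
            have hge2 : B.2 ≥ 2 := by omega
            simp [pvStepB, hne, hge2]
          rw [hstep, hstepB]
          refine ⟨?_, ?_, Or.inl ⟨rfl, rfl, fun _ => by simpa using hneq?⟩⟩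
          · show B.1 + 10 ^ (B.2 - 2).toNat = pvSum (A.2 ++ [List.replicate (j + 1 - st) c])
            rw [pvSum_append, hsc, pvCalculateScore]
            have h6 : (B.2 - 2).toNat = j + 1 - st - 2 := by omega
            rw [h6]
            simp [List.length_replicate]
          · intro d hd
            rcases List.mem_append.mp hd with hd | hd
            · exact hgood d hd
            · simp at hd
              exact ⟨j + 1 - st, c, by omega, hd⟩

-- a constant run of length ≥ 2 is a suffix of s only if s's last two chars are equal
theorem pv_suffix_last_two (s : List Char) (L : Nat) (c : Char) (hL : 2 ≤ L)
    (hs : List.replicate L c <:+ s) :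
    s[s.length - 2]? = s[s.length - 1]? := by
  obtain ⟨pre, hpre⟩ := hs
  have hlen : s.length = pre.length + L := by
    rw [← hpre]; simp
  have h1 : s[s.length - 1]? = some c := by
    rw [← hpre]
    rw [List.getElem?_append_right (by simp; omega)]
    simp
    rw [List.getElem?_eq_getElem (by simp; omega)]
    simp
  have h2 : s[s.length - 2]? = some c := by
    rw [← hpre]
    rw [List.getElem?_append_right (by simp; omega)]
    simp
    rw [List.getElem?_eq_getElem (by simp; omega)]
    simp
  rw [h1, h2]

-- proof-side abbreviations for the two else-branches
def pvACore (s : List Char) : Int :=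
  let dups := pvGetCons s (fun a b => a == b) false
  let score := dups.foldl (fun acc d => acc + pvCalculateScore d) 0
  if dups.length > 0 then
    let last := PySem.List.pyGetD dups ((dups.length : Int) - 1) []
    if PySem.Chars.endswith s last then score + pvCalculateScore last else score
  else score

def pvBCore (s : List Char) : Int :=
  let st := (s.zip s.tail).foldl pvStepB (0, 1)
  if st.2 ≥ 2 then st.1 + 2 * 10 ^ (st.2 - 2).toNat else st.1

theorem pv_core_eq_long (s : List Char) (hs : 2 ≤ s.length) :
    pvACore s = pvBCore s := by
  have hzlen : (s.zip s.tail).length = s.length - 1 := by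
    rw [List.length_zip, List.length_tail]; omega
  have hinv := pv_inv_holds s (s.length - 1) (le_refl _)
  rw [List.take_of_length_le (le_of_eq hzlen)] at hinv
  obtain ⟨hsc, hgood, hcase⟩ := hinv
  simp only [pvACore, pvBCore, pvGetCons]
  set A := (List.range (s.length - 1)).foldl (pvStepA s (fun a b => a == b) false) (-1, []) with hA
  set B := (s.zip s.tail).foldl pvStepB (0, 1) with hB
  clear_value A B
  rcases hcase with ⟨h1, h2, h3⟩ | ⟨st, h1, h2, h3, h4, h5⟩
  · -- final start = -1: no trailing run; B adds nothing, A's endswith test fails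
    have hAne : ¬ (A.1 != -1) = true := by simp [h1]
    rw [if_neg hAne]
    have hB2 : ¬ (B.2 ≥ 2) := by omega
    rw [if_neg (by simp : ¬ (false = true)), if_neg hB2]
    by_cases hlen0 : A.2.length > 0
    · rw [if_pos hlen0]
      have hmem : PySem.List.pyGetD A.2 ((A.2.length : Int) - 1) [] ∈ A.2 := by
        apply PySem.List.pyGetD_mem; simp [PySem.Raise.InRange]; omega
      obtain ⟨L, c, hL, hrepl⟩ := hgood _ hmem
      have hends : PySem.Chars.endswith s (PySem.List.pyGetD A.2 ((A.2.length : Int) - 1) []) = false := by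
        rcases Bool.eq_false_or_eq_true (PySem.Chars.endswith s (PySem.List.pyGetD A.2 ((A.2.length : Int) - 1) [])) with h | h
        swap
        · exact h
        · exfalso
          have hsuf : List.replicate L c <:+ s := hrepl ▸ (PySem.Chars.endswith_iff _ _).mp h
          have hne := h3 (by omega)
          have hidx : s.length - 1 - 1 = s.length - 2 := by omega
          exact hne (by rw [hidx]; exact pv_suffix_last_two s L c hL hsuf)
      rw [hends]
      simp only [Bool.false_eq_true, if_false]
      exact hsc.symm
    · rw [if_neg hlen0]
      exact hsc.symm
  · -- final start = st: trailing run flushed by the for-else; endswith bonus fires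
    have hAne : (A.1 != -1) = true := by simp [h1]
    rw [if_pos hAne]
    obtain ⟨c, hc⟩ : ∃ c, s[st]? = some c :=
      ⟨s[st]'(by omega), List.getElem?_eq_getElem (by omega)⟩
    have hcast : (s.length : Int) - 2 + 2 = ((s.length : Nat) : Int) := by ring
    have hslice : PySem.List.slice s (some A.1) (some ((s.length : Int) - 2 + 2))
        = List.replicate (s.length - st) c := by
      rw [h1, hcast, PySem.List.slice_natCast]
      exact pv_const_slice s st s.length (le_refl _) h5 (by omega) c hc
    rw [hslice]
    set R := List.replicate (s.length - st) c with hR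
    have hlenpos : (A.2 ++ [R]).length > 0 := by simp
    rw [if_pos hlenpos]
    -- the last collected sublist is the trailing run R
    have hlast : PySem.List.pyGetD (A.2 ++ [R]) (((A.2 ++ [R]).length : Int) - 1) [] = R := by
      have hcast2 : (((A.2 ++ [R]).length : Int) - 1) = ((A.2.length : Nat) : Int) := by
        have hl : (A.2 ++ [R]).length = A.2.length + 1 := by simp
        rw [hl]; push_cast; ring
      rw [hcast2, PySem.List.pyGetD_natCast]
      simp
    rw [hlast]
    -- R is a suffix of s, so the endswith bonus fires
    have hdrop : R = s.drop st := by
      rw [hR, ← pv_const_slice s st s.length (le_refl _) h5 (by omega) c hc]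
      have hdlen : (s.drop st).length = s.length - st := List.length_drop
      exact List.take_of_length_le (le_of_eq hdlen)
    have hends : PySem.Chars.endswith s R = true :=
      (PySem.Chars.endswith_iff _ _).mpr (hdrop ▸ List.drop_suffix st s)
    rw [hends]
    simp only [if_true]
    have hB2 : B.2 ≥ 2 := by omega
    rw [if_pos hB2]
    -- arithmetic: both sides are pvSum A.2 + 2 · 10^(s.length - st - 2)
    have hfold : (A.2 ++ [R]).foldl (fun acc d => acc + pvCalculateScore d) 0
        = pvSum A.2 + pvCalculateScore R := pvSum_append A.2 R
    rw [hfold, hsc]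
    have hRlen : R.length = s.length - st := by simp [hR]
    have hcalc : pvCalculateScore R = 10 ^ (s.length - st - 2) := by
      rw [pvCalculateScore, hRlen]
    have htoNat : (B.2 - 2).toNat = s.length - st - 2 := by omega
    rw [hcalc, htoNat]
    ring

theorem pv_core_eq (s : List Char) : pvACore s = pvBCore s := by
  rcases s with _ | ⟨a, t1⟩
  · rfl
  · rcases t1 with _ | ⟨b, t⟩
    · rfl
    · exact pv_core_eq_long (a :: b :: t) (by simp)

theorem pv_guard_iff (number : Int) :
    (PySem.Int.floordiv number 10 == 0) = true ↔ (0 ≤ number ∧ number ≤ 9) := by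
  rw [beq_iff_eq, PySem.Int.floordiv_eq_iff_of_pos (by norm_num)]
  omega

-- ===== VERDICT (by name: the statement is the Claim_ definition above) =====
theorem duplicate_digit_bonus_spec : Claim_equal_duplicate_digit_bonus := by
  intro number _
  unfold Spec_duplicate_digit_bonus duplicate_digit_bonus duplicate_digit_bonus_alt
  by_cases h : 0 ≤ number ∧ number ≤ 9
  · rw [if_pos ((pv_guard_iff number).mpr h), if_pos h]
  · rw [if_neg (fun hc => h ((pv_guard_iff number).mp hc)), if_neg h]
    simp only [PySem.List.slice_from_one]
    exact pv_core_eq (PySem.Int.toChars number)
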